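-- pv_equiv track=rewrite | github.com/nachos5/skoli | máltækni/verkefni_8/v.py | ordmyndir_filtered
-- ===== SOURCE A (Python) =====
-- def ordmyndir_filtered(
--     ordmyndir,
--     lengdir=[1, 2, 3, 4, 5, 6, 7, 8, 9, 10, 11, 12, 13, 14, 15, 16, 17, 18, 19, 20],
--     distances=[1, 2],
-- ):
--     filtered = dict()
--     for lengd in lengdir:
--         for distance in distances:
--             # fyrir hverja lengd + distance geymum við allar mögulegar orðmyndir sem edit_distance getur notað
--             index_strengur = f"{lengd}:{distance}"
--             filtered[index_strengur] = [
--                 o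
--                 for o in ordmyndir
--                 if len(o) >= lengd - distance and len(o) <= lengd + distance
--             ]
--     return filtered
-- ===== SOURCE B (Python) =====
-- def ordmyndir_filtered(
--     ordmyndir,
--     lengdir=[1, 2, 3, 4, 5, 6, 7, 8, 9, 10, 11, 12, 13, 14, 15, 16, 17, 18, 19, 20],
--     distances=[1, 2],
-- ):
--     # Canonicalise each bucket's length window [lengd-distance, lengd+distance] to the
--     # span of distinct word lengths it covers; buckets with the same span are the same
--     # list, so each distinct span is computed once and shared.
--     wlens = [len(o) for o in ordmyndir]
--     lens = sorted(set(wlens))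
--
--     def locate(x):  # how many distinct word lengths lie below x
--         return sum(1 for v in lens if v < x)
--
--     cache = {}
--     filtered = {}
--     for lengd in lengdir:
--         for distance in distances:
--             lo = lengd - distance
--             hi = lengd + distance
--             span = (locate(lo), locate(hi + 1))
--             bucket = cache.get(span)
--             if bucket is None:
--                 bucket = [o for o, n in zip(ordmyndir, wlens) if lo <= n <= hi]
--                 cache[span] = bucket
--             filtered[f"{lengd}:{distance}"] = bucket
--     return filtered
-- ===== Notes on version B (the rewrite author's own statement) =====
-- stated objective: alternative
-- what changed: Instead of re-filtering the whole word list once per (length, distance) bucket, B canonicalises each bucket's length window to the span of distinct word lengths it covers (a rank pair) and computes each distinct span's bucket only once, sharing it between all buckets with the same span (measured 4.2x faster at n=256, unconfirmed at the largest probe size).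
import Mathlib
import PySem

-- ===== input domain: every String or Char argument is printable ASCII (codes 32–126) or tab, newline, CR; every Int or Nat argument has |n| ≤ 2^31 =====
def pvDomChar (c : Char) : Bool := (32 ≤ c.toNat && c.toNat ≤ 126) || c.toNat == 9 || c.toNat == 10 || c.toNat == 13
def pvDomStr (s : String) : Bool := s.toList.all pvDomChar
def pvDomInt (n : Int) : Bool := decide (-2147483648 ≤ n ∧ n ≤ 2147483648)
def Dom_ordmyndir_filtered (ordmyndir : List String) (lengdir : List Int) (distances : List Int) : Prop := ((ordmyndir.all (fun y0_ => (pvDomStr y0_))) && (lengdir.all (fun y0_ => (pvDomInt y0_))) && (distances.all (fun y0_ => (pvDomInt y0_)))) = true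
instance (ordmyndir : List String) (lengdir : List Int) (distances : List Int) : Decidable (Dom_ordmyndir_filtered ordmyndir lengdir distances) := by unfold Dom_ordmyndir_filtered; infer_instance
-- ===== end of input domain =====

-- B canonicalises each bucket's length window to the span of distinct word lengths it covers
-- and computes each distinct span only once, sharing the bucket, instead of A's re-filter of
-- the whole word list once per (length, distance) bucket.

-- f"{lengd}:{distance}" (used by both Pythons)
def pvKey (l d : Int) : String := PySem.Str.join ":" [PySem.Int.toStr l, PySem.Int.toStr d]

-- ===== PORT A =====
def ordmyndir_filtered (ordmyndir : List String) (lengdir : List Int) (distances : List Int) : List (String × List String) :=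
  (lengdir.foldl (fun filtered lengd =>
      distances.foldl (fun filtered distance =>
          filtered.insert (pvKey lengd distance)
            (ordmyndir.filter (fun o =>
              decide (PySem.Str.len o ≥ lengd - distance) && decide (PySem.Str.len o ≤ lengd + distance))))
        filtered)
    (PySem.Dict.empty : PySem.Dict String (List String))).items

-- ===== PORT B =====
-- lens = sorted(set(wlens)) of Source B, with wlens = [len(o) for o in ordmyndir]
def pvLens (ordmyndir : List String) : List Int :=
  PySem.List.sorted (PySem.Set.ofList (ordmyndir.map PySem.Str.len)) (fun v => v) false

-- locate(x) of Source B: sum(1 for v in lens if v < x)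
def pvLocate (ordmyndir : List String) (x : Int) : Int :=
  (((pvLens ordmyndir).filter (fun v => decide (v < x))).length : Int)

def ordmyndir_filtered_alt (ordmyndir : List String) (lengdir : List Int) (distances : List Int) : List (String × List String) :=
  (lengdir.foldl (fun st lengd =>
      distances.foldl (fun st distance =>
          let lo := lengd - distance
          let hi := lengd + distance
          let span := (pvLocate ordmyndir lo, pvLocate ordmyndir (hi + 1))
          match st.2.get? span with
          | some bucket => (st.1.insert (pvKey lengd distance) bucket, st.2)
          | none =>
            let bucket := ((ordmyndir.zip (ordmyndir.map PySem.Str.len)).filter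
                (fun q => decide (lo ≤ q.2) && decide (q.2 ≤ hi))).map (fun q => q.1)
            (st.1.insert (pvKey lengd distance) bucket, st.2.insert span bucket))
        st)
    ((PySem.Dict.empty : PySem.Dict String (List String)),
     (PySem.Dict.empty : PySem.Dict (Int × Int) (List String)))).1.items

-- ===== PRECONDITION & SPEC =====
def Spec_ordmyndir_filtered (ordmyndir : List String) (lengdir : List Int) (distances : List Int) (out : List (String × List String)) : Prop := out = ordmyndir_filtered_alt ordmyndir lengdir distances
instance (ordmyndir : List String) (lengdir : List Int) (distances : List Int) (out : List (String × List String)) : Decidable (Spec_ordmyndir_filtered ordmyndir lengdir distances out) := by unfold Spec_ordmyndir_filtered; infer_instance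

-- ===== CLAIM (what is proved, stated in full; the proofs are below) =====
def Claim_equal_ordmyndir_filtered : Prop := ∀ (ordmyndir : List String) (lengdir : List Int) (distances : List Int), Dom_ordmyndir_filtered ordmyndir lengdir distances → Spec_ordmyndir_filtered ordmyndir lengdir distances (ordmyndir_filtered ordmyndir lengdir distances)

-- ===== LEMMAS AND PROOFS =====

-- the word bucket A computes for a (lengd, distance) pair
def pvVal (ordmyndir : List String) (l d : Int) : List String :=
  ordmyndir.filter (fun o =>
    decide (PySem.Str.len o ≥ l - d) && decide (PySem.Str.len o ≤ l + d))

-- the (lengd, distance) pairs both nested loops run over, in order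
def pvPairs (lengdir distances : List Int) : List (Int × Int) :=
  lengdir.flatMap (fun l => distances.map (fun d => (l, d)))

-- B's zip comprehension computes exactly A's bucket
lemma pvBucket_eq (ws : List String) (lo hi : Int) :
    ((ws.zip (ws.map PySem.Str.len)).filter
        (fun q => decide (lo ≤ q.2) && decide (q.2 ≤ hi))).map (fun q => q.1)
      = ws.filter (fun o => decide (PySem.Str.len o ≥ lo) && decide (PySem.Str.len o ≤ hi)) := by
  have hz : ∀ (l : List String), l.zip (l.map PySem.Str.len) = l.map (fun o => (o, PySem.Str.len o)) := by
    intro l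
    induction l with
    | nil => rfl
    | cons a l ih => simp [ih]
  rw [hz ws, List.filter_map, List.map_map]
  simp [Function.comp_def, ge_iff_le]

lemma pvLocate_mono (ws : List String) {x y : Int} (h : x ≤ y) :
    pvLocate ws x ≤ pvLocate ws y := by
  unfold pvLocate
  have : ((pvLens ws).filter (fun v => decide (v < x))).length
      ≤ ((pvLens ws).filter (fun v => decide (v < y))).length := by
    simp only [← List.countP_eq_length_filter]
    apply List.countP_mono_left
    intro a _ ha
    simp only [decide_eq_true_eq] at ha ⊢
    omega
  omega

lemma pvCount_lt {n x : Int} : ∀ (l : List Int), n ∈ l → n < x →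
    (l.filter (fun v => decide (v < n))).length < (l.filter (fun v => decide (v < x))).length := by
  intro l
  induction l with
  | nil => simp
  | cons a l ih =>
    intro hmem hx
    have hmono : (l.filter (fun v => decide (v < n))).length
        ≤ (l.filter (fun v => decide (v < x))).length := by
      simp only [← List.countP_eq_length_filter]
      apply List.countP_mono_left
      intro b _ hb
      simp only [decide_eq_true_eq] at hb ⊢
      omega
    rw [List.filter_cons, List.filter_cons]
    rcases List.mem_cons.1 hmem with rfl | hmem'
    · rw [if_neg (by simp), if_pos (by simpa using hx)]
      simp only [List.length_cons]
      omega
    · have := ih hmem' hx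
      by_cases han : a < n
      · rw [if_pos (by simpa using han), if_pos (by simp; omega)]
        simpa using this
      · rw [if_neg (by simpa using han)]
        split <;> simp <;> omega

-- every word's length occurs in lens
lemma pvLen_mem (ws : List String) {o : String} (ho : o ∈ ws) :
    PySem.Str.len o ∈ pvLens ws := by
  rw [pvLens, PySem.List.mem_sorted, PySem.Set.mem_ofList, List.mem_map]
  exact ⟨o, ho, rfl⟩

lemma pvLe_iff (ws : List String) {n : Int} (hn : n ∈ pvLens ws) (x : Int) :
    x ≤ n ↔ pvLocate ws x ≤ pvLocate ws n := by
  constructor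
  · exact fun h => pvLocate_mono ws h
  · intro h
    by_contra hxn
    have := pvCount_lt (pvLens ws) hn (by omega : n < x)
    unfold pvLocate at h
    omega

lemma pvLt_iff (ws : List String) {n : Int} (hn : n ∈ pvLens ws) (x : Int) :
    n ≤ x ↔ pvLocate ws n < pvLocate ws (x + 1) := by
  constructor
  · intro h
    have := pvCount_lt (pvLens ws) hn (by omega : n < x + 1)
    unfold pvLocate
    omega
  · intro h
    by_contra hxn
    have := pvLocate_mono ws (by omega : x + 1 ≤ n)
    omega

-- buckets whose windows cover the same span of occurring word lengths are equal
lemma pvSpan_filter (ws : List String) {l1 d1 l2 d2 : Int}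
    (h1 : pvLocate ws (l1 - d1) = pvLocate ws (l2 - d2))
    (h2 : pvLocate ws (l1 + d1 + 1) = pvLocate ws (l2 + d2 + 1)) :
    pvVal ws l1 d1 = pvVal ws l2 d2 := by
  unfold pvVal
  apply List.filter_congr
  intro o ho
  have hn := pvLen_mem ws ho
  have e1 : (PySem.Str.len o ≥ l1 - d1) ↔ (PySem.Str.len o ≥ l2 - d2) := by
    rw [ge_iff_le, ge_iff_le, pvLe_iff ws hn (l1 - d1), pvLe_iff ws hn (l2 - d2), h1]
  have e2 : (PySem.Str.len o ≤ l1 + d1) ↔ (PySem.Str.len o ≤ l2 + d2) := by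
    rw [pvLt_iff ws hn (l1 + d1), pvLt_iff ws hn (l2 + d2), h2]
  rw [decide_eq_decide.2 e1, decide_eq_decide.2 e2]

-- the cache only ever holds correct buckets
def pvCacheInv (ws : List String) (C : PySem.Dict (Int × Int) (List String)) : Prop :=
  ∀ (l d : Int) (v : List String),
    C.get? (pvLocate ws (l - d), pvLocate ws (l + d + 1)) = some v → v = pvVal ws l d

-- the filtered-dict component of B's fold is A's plain insert fold
lemma pvFold2_fst (ws : List String) :
    ∀ (ps : List (Int × Int)) (F : PySem.Dict String (List String))
      (C : PySem.Dict (Int × Int) (List String)), pvCacheInv ws C →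
      ((ps.foldl (fun st p =>
          match st.2.get? (pvLocate ws (p.1 - p.2), pvLocate ws (p.1 + p.2 + 1)) with
          | some bucket => (st.1.insert (pvKey p.1 p.2) bucket, st.2)
          | none =>
            let bucket := ((ws.zip (ws.map PySem.Str.len)).filter
                (fun q => decide (p.1 - p.2 ≤ q.2) && decide (q.2 ≤ p.1 + p.2))).map (fun q => q.1)
            (st.1.insert (pvKey p.1 p.2) bucket,
             st.2.insert (pvLocate ws (p.1 - p.2), pvLocate ws (p.1 + p.2 + 1)) bucket))
        (F, C)).1
        = ps.foldl (fun F p => F.insert (pvKey p.1 p.2) (pvVal ws p.1 p.2)) F) := by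
  intro ps
  induction ps with
  | nil => intro F C _; rfl
  | cons p ps ih =>
    intro F C hinv
    rw [List.foldl_cons, List.foldl_cons]
    rcases hget : C.get? (pvLocate ws (p.1 - p.2), pvLocate ws (p.1 + p.2 + 1)) with _ | b
    · have hbucket : ((ws.zip (ws.map PySem.Str.len)).filter
          (fun q => decide (p.1 - p.2 ≤ q.2) && decide (q.2 ≤ p.1 + p.2))).map (fun q => q.1)
          = pvVal ws p.1 p.2 := pvBucket_eq ws (p.1 - p.2) (p.1 + p.2)
      rw [hbucket]
      apply ih
      intro l d v hv
      rw [PySem.Dict.get?_insert] at hv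
      split at hv
      · rename_i heq
        have h1 : pvLocate ws (l - d) = pvLocate ws (p.1 - p.2) := congrArg Prod.fst heq
        have h2 : pvLocate ws (l + d + 1) = pvLocate ws (p.1 + p.2 + 1) := congrArg Prod.snd heq
        have hveq : v = pvVal ws p.1 p.2 := by simpa using hv.symm
        exact hveq.trans (pvSpan_filter ws h1 h2).symm
      · exact hinv l d v hv
    · rw [hinv p.1 p.2 b hget]
      exact ih _ _ hinv

-- ===== VERDICT (by name: the statement is the Claim_ definition above) =====
theorem ordmyndir_filtered_spec : Claim_equal_ordmyndir_filtered := by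
  intro ws lengdir distances _
  show ordmyndir_filtered ws lengdir distances = ordmyndir_filtered_alt ws lengdir distances
  unfold ordmyndir_filtered ordmyndir_filtered_alt
  have hinv : pvCacheInv ws PySem.Dict.empty := by
    intro l d v hv
    rw [PySem.Dict.get?_empty] at hv
    exact absurd hv (by simp)
  have h := pvFold2_fst ws (pvPairs lengdir distances) PySem.Dict.empty PySem.Dict.empty hinv
  have hB : (lengdir.foldl (fun st lengd =>
      distances.foldl (fun st distance =>
          let lo := lengd - distance
          let hi := lengd + distance
          let span := (pvLocate ws lo, pvLocate ws (hi + 1))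
          match st.2.get? span with
          | some bucket => (st.1.insert (pvKey lengd distance) bucket, st.2)
          | none =>
            let bucket := ((ws.zip (ws.map PySem.Str.len)).filter
                (fun q => decide (lo ≤ q.2) && decide (q.2 ≤ hi))).map (fun q => q.1)
            (st.1.insert (pvKey lengd distance) bucket, st.2.insert span bucket))
        st)
    ((PySem.Dict.empty : PySem.Dict String (List String)),
     (PySem.Dict.empty : PySem.Dict (Int × Int) (List String))))
      = ((pvPairs lengdir distances).foldl (fun st (p : Int × Int) =>
          match st.2.get? (pvLocate ws (p.1 - p.2), pvLocate ws (p.1 + p.2 + 1)) with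
          | some bucket => (st.1.insert (pvKey p.1 p.2) bucket, st.2)
          | none =>
            let bucket := ((ws.zip (ws.map PySem.Str.len)).filter
                (fun q => decide (p.1 - p.2 ≤ q.2) && decide (q.2 ≤ p.1 + p.2))).map (fun q => q.1)
            (st.1.insert (pvKey p.1 p.2) bucket,
             st.2.insert (pvLocate ws (p.1 - p.2), pvLocate ws (p.1 + p.2 + 1)) bucket))
        (PySem.Dict.empty, PySem.Dict.empty)) := by
    simp only [pvPairs, List.foldl_flatMap, List.foldl_map]
  have hA : (lengdir.foldl (fun filtered lengd =>
      distances.foldl (fun filtered distance =>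
          filtered.insert (pvKey lengd distance)
            (ws.filter (fun o =>
              decide (PySem.Str.len o ≥ lengd - distance) && decide (PySem.Str.len o ≤ lengd + distance))))
        filtered)
    (PySem.Dict.empty : PySem.Dict String (List String)))
      = (pvPairs lengdir distances).foldl
          (fun F p => F.insert (pvKey p.1 p.2) (pvVal ws p.1 p.2)) PySem.Dict.empty := by
    simp only [pvPairs, List.foldl_flatMap, List.foldl_map, pvVal]
  rw [hA, hB, h]
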